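-- pv_equiv track=rewrite | github.com/Imen2204/matrix | Matrix app/app.py | multiply_lower_band_matrix_vector
-- ===== SOURCE A (Python) =====
-- def multiply_lower_band_matrix_vector(matrix, vector, m):
--     n=len(matrix)
--     result = [0] * n
--     for i in range(n):
--         result[i] = 0
--         for j in range(max(0, i-1),i+1):
--             result[i] += matrix[i][j] * vector[j]
--     return result
-- ===== SOURCE B (Python) =====
-- def multiply_lower_band_matrix_vector(matrix, vector, m):
--     # Recursive, allocation-free of a result array: builds the output by cons,
--     # threading the previous vector element as an accumulator so the
--     # subdiagonal term never re-indexes the vector.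
--     def go(i, prev):
--         if i >= len(matrix):
--             return []
--         row = matrix[i]
--         v = vector[i]
--         if prev is None:
--             acc = row[i] * v
--         else:
--             acc = row[i - 1] * prev + row[i] * v
--         return [acc] + go(i + 1, v)
--     return go(0, None)
-- ===== Notes on version B (the rewrite author's own statement) =====
-- stated objective: alternative
-- what changed: Replaces A's nested imperative loops mutating a preallocated result array by a structural recursion that conses the output and threads the previous vector element through an accumulator, so the subdiagonal term uses the carried value instead of indexing vector[i-1].
import Mathlib
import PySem

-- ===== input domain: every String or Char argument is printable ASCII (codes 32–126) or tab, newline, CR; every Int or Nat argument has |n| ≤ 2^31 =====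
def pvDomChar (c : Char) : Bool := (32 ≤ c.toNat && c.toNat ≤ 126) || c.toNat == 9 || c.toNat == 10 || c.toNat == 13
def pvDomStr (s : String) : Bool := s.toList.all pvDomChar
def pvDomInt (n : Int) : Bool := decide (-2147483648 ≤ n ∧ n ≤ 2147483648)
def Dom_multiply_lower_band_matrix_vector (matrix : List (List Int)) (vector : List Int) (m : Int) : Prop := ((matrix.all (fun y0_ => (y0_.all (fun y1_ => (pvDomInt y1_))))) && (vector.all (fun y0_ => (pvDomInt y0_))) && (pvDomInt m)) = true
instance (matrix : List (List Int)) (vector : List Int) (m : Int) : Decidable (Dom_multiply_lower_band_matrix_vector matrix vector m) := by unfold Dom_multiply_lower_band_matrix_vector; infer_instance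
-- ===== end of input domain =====

-- B replaces A's nested loops mutating a preallocated result array by a structural recursion
-- that conses the output, carrying the previous vector element in an accumulator ("alternative").

-- ===== PORT A =====
def multiply_lower_band_matrix_vector (matrix : List (List Int)) (vector : List Int) (m : Int) : List Int :=
  (PySem.List.pyRange 0 (matrix.length : Int) 1).foldl
    (fun result i =>
      (PySem.List.pyRange (max 0 (i - 1)) (i + 1) 1).foldl
        (fun result j =>
          PySem.List.pySetD result i (PySem.List.pyGetD result i 0 +
            PySem.List.pyGetD (PySem.List.pyGetD matrix i []) j 0 * PySem.List.pyGetD vector j 0))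
        (PySem.List.pySetD result i 0))
    (List.replicate matrix.length 0)

-- ===== PORT B =====
-- the inner recursive helper `go(i, prev)` of Source B (prev : Option Int, None on the first row)
def pvGoB (matrix : List (List Int)) (vector : List Int) (i : Nat) (prev : Option Int) : List Int :=
  if _h : i < matrix.length then
    let row := PySem.List.pyGetD matrix (i : Int) []
    let v := PySem.List.pyGetD vector (i : Int) 0
    let acc := match prev with
      | none => PySem.List.pyGetD row (i : Int) 0 * v
      | some p => PySem.List.pyGetD row ((i : Int) - 1) 0 * p + PySem.List.pyGetD row (i : Int) 0 * v
    acc :: pvGoB matrix vector (i + 1) (some v)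
  else []
termination_by matrix.length - i

def multiply_lower_band_matrix_vector_alt (matrix : List (List Int)) (vector : List Int) (m : Int) : List Int :=
  pvGoB matrix vector 0 none

-- ===== PRECONDITION & SPEC =====
-- Pre_ excludes exactly the inputs on which Python A raises IndexError: some row i shorter
-- than i+1 entries, or the vector shorter than the matrix height.
def Pre_multiply_lower_band_matrix_vector (matrix : List (List Int)) (vector : List Int) (m : Int) : Prop :=
  ∀ i < matrix.length, i < (matrix.getD i []).length ∧ i < vector.length
instance (matrix : List (List Int)) (vector : List Int) (m : Int) : Decidable (Pre_multiply_lower_band_matrix_vector matrix vector m) := by unfold Pre_multiply_lower_band_matrix_vector; infer_instance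
def pvWitness_multiply_lower_band_matrix_vector : List (List Int) × List Int × Int := ([[1], [2, 3]], [4, 5], 0)

def Spec_multiply_lower_band_matrix_vector (matrix : List (List Int)) (vector : List Int) (m : Int) (out : List Int) : Prop := out = multiply_lower_band_matrix_vector_alt matrix vector m
instance (matrix : List (List Int)) (vector : List Int) (m : Int) (out : List Int) : Decidable (Spec_multiply_lower_band_matrix_vector matrix vector m out) := by unfold Spec_multiply_lower_band_matrix_vector; infer_instance

-- ===== CLAIM (what is proved, stated in full; the proofs are below) =====
def Claim_equal_multiply_lower_band_matrix_vector : Prop := ∀ (matrix : List (List Int)) (vector : List Int) (m : Int), Dom_multiply_lower_band_matrix_vector matrix vector m → Pre_multiply_lower_band_matrix_vector matrix vector m → Spec_multiply_lower_band_matrix_vector matrix vector m (multiply_lower_band_matrix_vector matrix vector m)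

-- ===== LEMMAS AND PROOFS =====

-- the band term matrix[i][j] * vector[j]
def pvTerm (matrix : List (List Int)) (vector : List Int) (i j : Int) : Int :=
  PySem.List.pyGetD (PySem.List.pyGetD matrix i []) j 0 * PySem.List.pyGetD vector j 0

-- the value both programs produce at position k
def pvSpec (matrix : List (List Int)) (vector : List Int) (k : Nat) : Int :=
  if k = 0 then pvTerm matrix vector (k : Int) (k : Int)
  else pvTerm matrix vector (k : Int) ((k : Int) - 1) + pvTerm matrix vector (k : Int) (k : Int)

lemma pv_set_map_range (f : Nat → Int) (n k : Nat) (v : Int) (hk : k < n) :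
    ((List.range n).map f).set k v = (List.range n).map fun j => if j = k then v else f j := by
  apply List.ext_getElem
  · simp
  · intro i h1 h2
    simp only [List.getElem_set, List.getElem_map, List.getElem_range]
    rcases eq_or_ne k i with h | h
    · simp [h]
    · simp [h, Ne.symm h]

lemma pv_get_state (f : Nat → Int) (n k : Nat) (hk : k < n) :
    PySem.List.pyGetD ((List.range n).map f) ((k : Nat) : Int) 0 = f k := by
  rw [PySem.List.pyGetD_natCast]
  exact PySem.List.getD_map_range f n k 0 hk

lemma pv_set_state (f : Nat → Int) (n k : Nat) (hk : k < n) (v : Int) :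
    PySem.List.pySetD ((List.range n).map f) ((k : Nat) : Int) v
      = (List.range n).map fun j => if j = k then v else f j := by
  rw [PySem.List.pySetD_natCast, pv_set_map_range f n k v hk]

-- one outer step of A, acting on the invariant state
lemma pv_stepA (matrix : List (List Int)) (vector : List Int) :
    ∀ k, k < matrix.length →
      (fun (result : List Int) (i : Int) =>
        (PySem.List.pyRange (max 0 (i - 1)) (i + 1) 1).foldl
          (fun result j =>
            PySem.List.pySetD result i (PySem.List.pyGetD result i 0 +
              PySem.List.pyGetD (PySem.List.pyGetD matrix i []) j 0 * PySem.List.pyGetD vector j 0))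
          (PySem.List.pySetD result i 0))
        ((List.range matrix.length).map fun j => if j < k then pvSpec matrix vector j else 0) ((k : Nat) : Int)
      = (List.range matrix.length).map fun j => if j < k + 1 then pvSpec matrix vector j else 0 := by
  intro k hk
  simp only []
  rw [pv_set_state _ _ _ hk]
  rcases Nat.eq_zero_or_pos k with hk0 | hk1
  · have hmax : max (0 : Int) ((k : Int) - 1) = (k : Int) := by subst hk0; norm_num
    rw [hmax, PySem.List.pyRange_one_singleton]
    simp only [List.foldl_cons, List.foldl_nil]
    rw [pv_get_state _ _ _ hk, pv_set_state _ _ _ hk]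
    refine congrArg (fun f => List.map f (List.range matrix.length)) ?_
    funext j
    rcases eq_or_ne j k with h | h
    · rw [h]
      simp [pvSpec, pvTerm, hk0]
    · simp only [if_neg h]
      rcases Nat.lt_or_ge j k with h2 | h2
      · simp [h2, Nat.lt_succ_of_lt h2]
      · have h3 : ¬ j < k := by omega
        have h4 : ¬ j < k + 1 := by omega
        simp [h3, h4]
  · have hmax : max (0 : Int) ((k : Int) - 1) = (k : Int) - 1 := max_eq_right (by omega)
    rw [hmax]
    rw [PySem.List.pyRange_one_cons (show (k : Int) - 1 < (k : Int) + 1 by omega)]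
    rw [show (k : Int) - 1 + 1 = (k : Int) by ring]
    rw [PySem.List.pyRange_one_cons (show (k : Int) < (k : Int) + 1 by omega)]
    rw [PySem.List.pyRange_one_eq_nil (le_refl ((k : Int) + 1))]
    simp only [List.foldl_cons, List.foldl_nil]
    rw [pv_get_state _ _ _ hk, pv_set_state _ _ _ hk]
    rw [pv_get_state _ _ _ hk, pv_set_state _ _ _ hk]
    refine congrArg (fun f => List.map f (List.range matrix.length)) ?_
    funext j
    rcases eq_or_ne j k with h | h
    · rw [h]
      have hkne : k ≠ 0 := by omega
      simp [pvSpec, pvTerm, hkne]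
    · simp only [if_neg h]
      rcases Nat.lt_or_ge j k with h2 | h2
      · simp [h2, Nat.lt_succ_of_lt h2]
      · have h3 : ¬ j < k := by omega
        have h4 : ¬ j < k + 1 := by omega
        simp [h3, h4]

-- a foldl over range(a, n) whose body carries the state s k to s (k+1)
lemma pv_foldl_state {α : Type} (body : α → Int → α) (s : Nat → α) (a0 n : Nat)
    (hstep : ∀ k, a0 ≤ k → k < n → body (s k) ((k : Nat) : Int) = s (k + 1)) :
    ∀ (a : Nat) (aI : Int), a0 ≤ a → aI = (a : Int) → a ≤ n →
      (PySem.List.pyRange aI (n : Int) 1).foldl body (s a) = s n := by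
  intro a
  induction hn : n - a generalizing a with
  | zero =>
    intro aI ha0 haI ha
    have : a = n := by omega
    subst this
    rw [haI, PySem.List.pyRange_one_eq_nil (le_refl _)]
    rfl
  | succ d ih =>
    intro aI ha0 haI ha
    have hlt : a < n := by omega
    rw [haI, PySem.List.pyRange_one_cons (by exact_mod_cast hlt)]
    rw [List.foldl_cons, hstep a ha0 hlt]
    rw [show ((a : Int) + 1) = ((a + 1 : Nat) : Int) by push_cast; ring]
    exact ih (a + 1) (by omega) _ (by omega) rfl (by omega)

-- A's result as a closed map
lemma pv_A_eq (matrix : List (List Int)) (vector : List Int) (m : Int) :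
    multiply_lower_band_matrix_vector matrix vector m
      = (List.range matrix.length).map (pvSpec matrix vector) := by
  have h := pv_foldl_state
    (fun (result : List Int) (i : Int) =>
      (PySem.List.pyRange (max 0 (i - 1)) (i + 1) 1).foldl
        (fun result j =>
          PySem.List.pySetD result i (PySem.List.pyGetD result i 0 +
            PySem.List.pyGetD (PySem.List.pyGetD matrix i []) j 0 * PySem.List.pyGetD vector j 0))
        (PySem.List.pySetD result i 0))
    (fun k => (List.range matrix.length).map fun j => if j < k then pvSpec matrix vector j else 0)
    0 matrix.length
    (fun k _ hk => pv_stepA matrix vector k hk)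
    0 0 (le_refl 0) (by norm_num) (Nat.zero_le _)
  have hs0 : (List.range matrix.length).map (fun j => if j < 0 then pvSpec matrix vector j else (0 : Int))
      = List.replicate matrix.length 0 := by
    rw [show (fun j => if j < 0 then pvSpec matrix vector j else (0 : Int)) = (fun _ => (0 : Int)) from by
      funext j; simp]
    simp [List.map_const']
  beta_reduce at h
  rw [hs0] at h
  unfold multiply_lower_band_matrix_vector
  rw [h]
  apply List.map_congr_left
  intro j hj
  rw [List.mem_range] at hj
  simp [hj]

-- B's recursion, characterised from any start index with the matching accumulator
lemma pv_goB_eq (matrix : List (List Int)) (vector : List Int) :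
    ∀ rem i, i + rem = matrix.length →
      pvGoB matrix vector i (if i = 0 then none else some (PySem.List.pyGetD vector ((i : Int) - 1) 0))
        = (List.range' i rem).map (pvSpec matrix vector) := by
  intro rem
  induction rem with
  | zero =>
    intro i hi
    rw [pvGoB]
    have : ¬ i < matrix.length := by omega
    simp [this]
  | succ d ih =>
    intro i hi
    have hlt : i < matrix.length := by omega
    rw [pvGoB, dif_pos hlt]
    have hrec := ih (i + 1) (by omega)
    have hne : i + 1 ≠ 0 := by omega
    rw [if_neg hne] at hrec
    rw [show ((i + 1 : Nat) : Int) - 1 = (i : Int) by push_cast; ring] at hrec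
    rw [List.range'_succ, List.map_cons]
    simp only []
    rw [hrec]
    rcases eq_or_ne i 0 with h0 | h0
    · subst h0
      simp [pvSpec, pvTerm]
    · rw [if_neg h0]
      have hk0 : ¬ i = 0 := h0
      simp [pvSpec, pvTerm, hk0]

lemma pv_main (matrix : List (List Int)) (vector : List Int) (m : Int) :
    multiply_lower_band_matrix_vector matrix vector m
      = multiply_lower_band_matrix_vector_alt matrix vector m := by
  rw [pv_A_eq matrix vector m]
  unfold multiply_lower_band_matrix_vector_alt
  have h := pv_goB_eq matrix vector matrix.length 0 (by omega)
  rw [if_pos rfl] at h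
  rw [h, List.range_eq_range']

-- ===== VERDICT (by name: the statement is the Claim_ definition above) =====
theorem multiply_lower_band_matrix_vector_spec : Claim_equal_multiply_lower_band_matrix_vector := by
  intro matrix vector m _ _
  unfold Spec_multiply_lower_band_matrix_vector
  exact pv_main matrix vector m
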